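-- pv_equiv track=rewrite | github.com/junqianxulab/SC_dMRI | csp_preprocessing/create_mask.py | dilate_nth
-- ===== SOURCE A (Python) =====
-- def nbd_4(ij, shape):
--     nbds = [ (-1,0), (1,0), (0,-1), (0,1) ]
--     return [ (ij[0] + nbd[0], ij[1] + nbd[1]) for nbd in nbds if 0 <= ij[0] + nbd[0] < shape[0] if 0 <= ij[1] + nbd[1] < shape[1] ]
--
-- def dilate_nth(base, nth, shape):
--     done = base[:]
--     to_do = base[:]
--     for i in range(nth):
--         ing = to_do[:]
--         to_do = []
--
--         for ij in ing:
--             for nbd in nbd_4(ij, shape):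
--                 if nbd not in to_do and nbd not in ing and nbd not in done:
--                     to_do.append(nbd)
--         done += to_do
--     return done
-- ===== SOURCE B (Python) =====
-- def dilate_nth(base, nth, shape):
--     # Single-list formulation: no separate frontier; each step rescans the whole
--     # current region (interior cells contribute nothing new, so additions and their
--     # order match the frontier-based original), with a set mirror of the region for
--     # O(1) membership tests.
--     done = base[:]
--     seen = set(done)
--     for _ in range(nth):
--         new = []
--         for (i, j) in done:
--             for n in ((i - 1, j), (i + 1, j), (i, j - 1), (i, j + 1)):
--                 if 0 <= n[0] < shape[0] and 0 <= n[1] < shape[1] and n not in seen: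
--                     seen.add(n)
--                     new.append(n)
--         done += new
--     return done
-- ===== Notes on version B (the rewrite author's own statement) =====
-- stated objective: alternative
-- what changed: B drops A's frontier (ing/to_do) bookkeeping and keeps a single region list plus a set mirror: each step it rescans the whole current region, collecting unseen in-bounds 4-neighbors inline with O(1) set membership tests instead of A's three linear list scans per neighbor.
import Mathlib
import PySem

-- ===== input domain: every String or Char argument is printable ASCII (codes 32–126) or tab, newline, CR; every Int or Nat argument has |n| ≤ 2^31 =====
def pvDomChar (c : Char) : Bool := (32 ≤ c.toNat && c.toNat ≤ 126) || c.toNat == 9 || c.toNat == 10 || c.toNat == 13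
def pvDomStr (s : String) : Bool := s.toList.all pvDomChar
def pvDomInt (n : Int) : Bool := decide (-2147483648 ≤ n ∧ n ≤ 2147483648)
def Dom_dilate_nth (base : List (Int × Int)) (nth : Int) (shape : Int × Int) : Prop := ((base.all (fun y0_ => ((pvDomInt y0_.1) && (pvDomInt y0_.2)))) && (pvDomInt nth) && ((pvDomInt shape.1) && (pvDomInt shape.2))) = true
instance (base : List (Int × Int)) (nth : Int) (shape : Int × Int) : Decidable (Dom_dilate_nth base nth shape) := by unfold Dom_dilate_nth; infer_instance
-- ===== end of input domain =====

-- B drops A's separate frontier: it keeps one list `done` and rescans all of it each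
-- step (interior cells add nothing), a simpler single-list decomposition; same values.

-- ===== PORT A =====
def nbd_4 (ij : Int × Int) (shape : Int × Int) : List (Int × Int) :=
  ([(-1, 0), (1, 0), (0, -1), (0, 1)] : List (Int × Int)).filterMap
    (fun nbd =>
      if 0 ≤ ij.1 + nbd.1 ∧ ij.1 + nbd.1 < shape.1 ∧ 0 ≤ ij.2 + nbd.2 ∧ ij.2 + nbd.2 < shape.2
      then some (ij.1 + nbd.1, ij.2 + nbd.2) else none)

def dilate_nth (base : List (Int × Int)) (nth : Int) (shape : Int × Int) : List (Int × Int) :=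
  ((PySem.List.pyRange 0 nth 1).foldl
    (fun (s : List (Int × Int) × List (Int × Int)) _ =>
      let to_do :=
        s.2.foldl
          (fun td ij =>
            (nbd_4 ij shape).foldl
              (fun td n => if n ∉ td ∧ n ∉ s.2 ∧ n ∉ s.1 then td ++ [n] else td) td) []
      (s.1 ++ to_do, to_do))
    (base, base)).1

-- ===== PORT B =====
def dilate_nth_alt (base : List (Int × Int)) (nth : Int) (shape : Int × Int) : List (Int × Int) :=
  ((PySem.List.pyRange 0 nth 1).foldl
    (fun (s : List (Int × Int) × PySem.Set (Int × Int)) _ =>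
      let p :=
        s.1.foldl
          (fun (q : List (Int × Int) × PySem.Set (Int × Int)) ij =>
            ([(-1, 0), (1, 0), (0, -1), (0, 1)] : List (Int × Int)).foldl
              (fun q d =>
                let n := (ij.1 + d.1, ij.2 + d.2)
                if 0 ≤ n.1 ∧ n.1 < shape.1 ∧ 0 ≤ n.2 ∧ n.2 < shape.2 ∧ n ∉ q.2
                then (q.1 ++ [n], PySem.Set.add q.2 n) else q) q)
          ([], s.2)
      (s.1 ++ p.1, p.2))
    (base, PySem.Set.ofList base)).1

-- ===== PRECONDITION & SPEC =====
def Spec_dilate_nth (base : List (Int × Int)) (nth : Int) (shape : Int × Int) (out : List (Int × Int)) : Prop := out = dilate_nth_alt base nth shape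
instance (base : List (Int × Int)) (nth : Int) (shape : Int × Int) (out : List (Int × Int)) : Decidable (Spec_dilate_nth base nth shape out) := by unfold Spec_dilate_nth; infer_instance

-- ===== CLAIM (what is proved, stated in full; the proofs are below) =====
def Claim_equal_dilate_nth : Prop := ∀ (base : List (Int × Int)) (nth : Int) (shape : Int × Int), Dom_dilate_nth base nth shape → Spec_dilate_nth base nth shape (dilate_nth base nth shape)

-- ===== LEMMAS AND PROOFS =====

-- canonical one-cell step: add the in-bounds neighbours of ij not yet in done/acc
def pvInner (shape : Int × Int) (done acc : List (Int × Int)) (ij : Int × Int) : List (Int × Int) :=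
  (nbd_4 ij shape).foldl (fun acc n => if n ∉ done ∧ n ∉ acc then acc ++ [n] else acc) acc

-- canonical scan of a list of cells
def pvScan (shape : Int × Int) (done : List (Int × Int)) (L acc : List (Int × Int)) : List (Int × Int) :=
  L.foldl (pvInner shape done) acc

lemma pv_foldl_mono {α : Type} (f : List (Int × Int) → α → List (Int × Int))
    (h : ∀ acc a x, x ∈ acc → x ∈ f acc a) :
    ∀ (l : List α) (acc : List (Int × Int)) (x : Int × Int), x ∈ acc → x ∈ l.foldl f acc := by
  intro l
  induction l with
  | nil => intro acc x hx; simpa using hx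
  | cons a l ih => intro acc x hx; exact ih (f acc a) x (h acc a x hx)

lemma pvInner_mono (shape : Int × Int) (done acc : List (Int × Int)) (ij x : Int × Int)
    (hx : x ∈ acc) : x ∈ pvInner shape done acc ij := by
  unfold pvInner
  refine pv_foldl_mono _ ?_ _ _ _ hx
  intro acc n y hy
  split <;> simp [hy]

lemma pvScan_mono (shape : Int × Int) (done L acc : List (Int × Int)) (x : Int × Int)
    (hx : x ∈ acc) : x ∈ pvScan shape done L acc := by
  unfold pvScan
  exact pv_foldl_mono _ (fun acc a y hy => pvInner_mono shape done acc a y hy) L acc x hx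

lemma pvInner_covers (shape : Int × Int) (done acc : List (Int × Int)) (ij : Int × Int) :
    ∀ n ∈ nbd_4 ij shape, n ∈ done ∨ n ∈ pvInner shape done acc ij := by
  unfold pvInner
  generalize nbd_4 ij shape = l
  induction l generalizing acc with
  | nil => simp
  | cons a l ih =>
    intro n hn
    simp only [List.foldl_cons]
    rcases List.mem_cons.mp hn with hn | hn
    · subst hn
      by_cases h : n ∉ done ∧ n ∉ acc
      · right
        refine pv_foldl_mono _ ?_ l _ n ?_
        · intro acc m y hy; split <;> simp [hy]
        · simp [h]
      · push Not at h
        by_cases hd : n ∈ done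
        · exact Or.inl hd
        · right
          refine pv_foldl_mono _ ?_ l _ n ?_
          · intro acc m y hy; split <;> simp [hy]
          · have : n ∈ acc := h hd
            split <;> simp [this]
    · exact ih _ n hn

lemma pvScan_covers (shape : Int × Int) (done L acc : List (Int × Int)) :
    ∀ c ∈ L, ∀ n ∈ nbd_4 c shape, n ∈ done ∨ n ∈ pvScan shape done L acc := by
  induction L generalizing acc with
  | nil => simp
  | cons a L ih =>
    intro c hc n hn
    unfold pvScan
    simp only [List.foldl_cons]
    rcases List.mem_cons.mp hc with hc | hc
    · subst hc
      rcases pvInner_covers shape done acc c n hn with h | h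
      · exact Or.inl h
      · exact Or.inr (pvScan_mono shape done L _ n h)
    · exact ih _ c hc n hn

lemma pvInner_skip (shape : Int × Int) (done acc : List (Int × Int)) (ij : Int × Int)
    (h : ∀ n ∈ nbd_4 ij shape, n ∈ done) : pvInner shape done acc ij = acc := by
  unfold pvInner
  revert h
  generalize nbd_4 ij shape = l
  induction l generalizing acc with
  | nil => simp
  | cons a l ih =>
    intro h
    simp only [List.foldl_cons]
    have ha : a ∈ done := h a (by simp)
    rw [if_neg (by simp [ha])]
    exact ih acc (fun n hn => h n (by simp [hn]))

lemma pvScan_skip (shape : Int × Int) (done L acc : List (Int × Int))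
    (h : ∀ c ∈ L, ∀ n ∈ nbd_4 c shape, n ∈ done) : pvScan shape done L acc = acc := by
  induction L generalizing acc with
  | nil => rfl
  | cons a L ih =>
    unfold pvScan
    simp only [List.foldl_cons]
    rw [show pvInner shape done acc a = acc from pvInner_skip shape done acc a (h a (by simp))]
    exact ih acc (fun c hc n hn => h c (List.mem_cons_of_mem a hc) n hn)

-- A's step (3-way guard) equals the canonical scan when ing ⊆ done
lemma pvAstep_eq (shape : Int × Int) (done ing acc : List (Int × Int)) (hsub : ∀ x ∈ ing, x ∈ done) :
    ing.foldl
      (fun td ij =>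
        (nbd_4 ij shape).foldl
          (fun td n => if n ∉ td ∧ n ∉ ing ∧ n ∉ done then td ++ [n] else td) td) acc
    = pvScan shape done ing acc := by
  unfold pvScan
  refine List.foldl_ext _ _ acc ?_
  intro td ij _
  unfold pvInner
  refine List.foldl_ext _ _ td ?_
  intro td n _
  by_cases hi : n ∈ ing
  · have hd : n ∈ done := hsub n hi
    rw [if_neg (by simp [hi]), if_neg (by simp [hd])]
  · by_cases hd : n ∈ done
    · rw [if_neg (by simp [hd]), if_neg (by simp [hd])]
    · by_cases ht : n ∈ td
      · rw [if_neg (by simp [ht]), if_neg (by simp [ht])]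
      · rw [if_pos (by simp [ht, hi, hd]), if_pos (by simp [ht, hd])]

-- B's per-cell function (the inner loop of the port, named for the proofs)
def pvCellB (shape : Int × Int) (q : List (Int × Int) × PySem.Set (Int × Int)) (ij : Int × Int) :
    List (Int × Int) × PySem.Set (Int × Int) :=
  ([(-1, 0), (1, 0), (0, -1), (0, 1)] : List (Int × Int)).foldl
    (fun q d =>
      let n := (ij.1 + d.1, ij.2 + d.2)
      if 0 ≤ n.1 ∧ n.1 < shape.1 ∧ 0 ≤ n.2 ∧ n.2 < shape.2 ∧ n ∉ q.2
      then (q.1 ++ [n], PySem.Set.add q.2 n) else q) q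

-- foldl over a filterMap, phrased with Option.elim
lemma pv_foldl_filterMap {α β γ : Type} (g : α → Option β) (f : γ → β → γ) :
    ∀ (l : List α) (init : γ),
      (l.filterMap g).foldl f init = l.foldl (fun s x => (g x).elim s (f s)) init := by
  intro l
  induction l with
  | nil => intro init; rfl
  | cons a l ih =>
    intro init
    cases hga : g a <;> simp [hga, ih]

-- B's per-element candidate step, tracking (new, seen), agrees with the canonical scan
-- while seen mirrors membership of doneL ++ new
lemma pvBcell_aux (shape : Int × Int) (doneL : List (Int × Int)) (ij : Int × Int) :
    ∀ (l : List (Int × Int)) (q : List (Int × Int) × PySem.Set (Int × Int)),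
      (∀ x, x ∈ q.2 ↔ x ∈ doneL ∨ x ∈ q.1) →
      (l.foldl
          (fun q d =>
            let n := (ij.1 + d.1, ij.2 + d.2)
            if 0 ≤ n.1 ∧ n.1 < shape.1 ∧ 0 ≤ n.2 ∧ n.2 < shape.2 ∧ n ∉ q.2
            then (q.1 ++ [n], PySem.Set.add q.2 n) else q) q).1
        = l.foldl
            (fun acc d =>
              (if 0 ≤ ij.1 + d.1 ∧ ij.1 + d.1 < shape.1 ∧ 0 ≤ ij.2 + d.2 ∧ ij.2 + d.2 < shape.2
               then some (ij.1 + d.1, ij.2 + d.2) else none).elim acc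
                (fun n => if n ∉ doneL ∧ n ∉ acc then acc ++ [n] else acc)) q.1
      ∧ ∀ x, x ∈ (l.foldl
          (fun q d =>
            let n := (ij.1 + d.1, ij.2 + d.2)
            if 0 ≤ n.1 ∧ n.1 < shape.1 ∧ 0 ≤ n.2 ∧ n.2 < shape.2 ∧ n ∉ q.2
            then (q.1 ++ [n], PySem.Set.add q.2 n) else q) q).2
          ↔ x ∈ doneL ∨ x ∈ (l.foldl
          (fun q d =>
            let n := (ij.1 + d.1, ij.2 + d.2)
            if 0 ≤ n.1 ∧ n.1 < shape.1 ∧ 0 ≤ n.2 ∧ n.2 < shape.2 ∧ n ∉ q.2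
            then (q.1 ++ [n], PySem.Set.add q.2 n) else q) q).1 := by
  intro l
  induction l with
  | nil => intro q h; exact ⟨rfl, h⟩
  | cons d l ih =>
    intro q h
    simp only [List.foldl_cons]
    by_cases hb : 0 ≤ ij.1 + d.1 ∧ ij.1 + d.1 < shape.1 ∧ 0 ≤ ij.2 + d.2 ∧ ij.2 + d.2 < shape.2
    · rw [if_pos hb]
      dsimp only [Option.elim_some]
      by_cases hm : (ij.1 + d.1, ij.2 + d.2) ∈ q.2
      · have hm' : (ij.1 + d.1, ij.2 + d.2) ∈ doneL ∨ (ij.1 + d.1, ij.2 + d.2) ∈ q.1 := (h _).mp hm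
        rw [show (if 0 ≤ ij.1 + d.1 ∧ ij.1 + d.1 < shape.1 ∧ 0 ≤ ij.2 + d.2 ∧ ij.2 + d.2 < shape.2
                    ∧ (ij.1 + d.1, ij.2 + d.2) ∉ q.2
                  then (q.1 ++ [(ij.1 + d.1, ij.2 + d.2)], PySem.Set.add q.2 (ij.1 + d.1, ij.2 + d.2))
                  else q) = q from if_neg (by tauto),
            show (if (ij.1 + d.1, ij.2 + d.2) ∉ doneL ∧ (ij.1 + d.1, ij.2 + d.2) ∉ q.1
                  then q.1 ++ [(ij.1 + d.1, ij.2 + d.2)] else q.1) = q.1 from if_neg (by tauto)]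
        exact ih q h
      · have hm' : ¬ ((ij.1 + d.1, ij.2 + d.2) ∈ doneL ∨ (ij.1 + d.1, ij.2 + d.2) ∈ q.1) :=
          fun hc => hm ((h _).mpr hc)
        rw [show (if 0 ≤ ij.1 + d.1 ∧ ij.1 + d.1 < shape.1 ∧ 0 ≤ ij.2 + d.2 ∧ ij.2 + d.2 < shape.2
                    ∧ (ij.1 + d.1, ij.2 + d.2) ∉ q.2
                  then (q.1 ++ [(ij.1 + d.1, ij.2 + d.2)], PySem.Set.add q.2 (ij.1 + d.1, ij.2 + d.2))
                  else q)
                = (q.1 ++ [(ij.1 + d.1, ij.2 + d.2)], PySem.Set.add q.2 (ij.1 + d.1, ij.2 + d.2))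
              from if_pos (by tauto),
            show (if (ij.1 + d.1, ij.2 + d.2) ∉ doneL ∧ (ij.1 + d.1, ij.2 + d.2) ∉ q.1
                  then q.1 ++ [(ij.1 + d.1, ij.2 + d.2)] else q.1)
                = q.1 ++ [(ij.1 + d.1, ij.2 + d.2)] from if_pos (by tauto)]
        refine ih _ ?_
        intro y
        simp only [PySem.Set.mem_add, List.mem_append, List.mem_singleton, h y]
        tauto
    · rw [if_neg hb]
      dsimp only [Option.elim_none]
      rw [show (if 0 ≤ ij.1 + d.1 ∧ ij.1 + d.1 < shape.1 ∧ 0 ≤ ij.2 + d.2 ∧ ij.2 + d.2 < shape.2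
                  ∧ (ij.1 + d.1, ij.2 + d.2) ∉ q.2
                then (q.1 ++ [(ij.1 + d.1, ij.2 + d.2)], PySem.Set.add q.2 (ij.1 + d.1, ij.2 + d.2))
                else q) = q from if_neg (by tauto)]
      exact ih q h

-- B's per-cell loop equals the canonical one-cell step
lemma pvBcell (shape : Int × Int) (doneL : List (Int × Int)) (ij : Int × Int)
    (q : List (Int × Int) × PySem.Set (Int × Int))
    (h : ∀ x, x ∈ q.2 ↔ x ∈ doneL ∨ x ∈ q.1) :
    (pvCellB shape q ij).1 = pvInner shape doneL q.1 ij
    ∧ ∀ x, x ∈ (pvCellB shape q ij).2 ↔ x ∈ doneL ∨ x ∈ (pvCellB shape q ij).1 := by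
  have hmatch : pvInner shape doneL q.1 ij
      = ([(-1, 0), (1, 0), (0, -1), (0, 1)] : List (Int × Int)).foldl
          (fun acc d =>
            (if 0 ≤ ij.1 + d.1 ∧ ij.1 + d.1 < shape.1 ∧ 0 ≤ ij.2 + d.2 ∧ ij.2 + d.2 < shape.2
             then some (ij.1 + d.1, ij.2 + d.2) else none).elim acc
              (fun n => if n ∉ doneL ∧ n ∉ acc then acc ++ [n] else acc)) q.1 := by
    unfold pvInner nbd_4
    rw [pv_foldl_filterMap]
  unfold pvCellB
  rw [hmatch]
  exact pvBcell_aux shape doneL ij _ q h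

-- B's whole-region scan equals the canonical scan, preserving the seen-mirror
lemma pvBscan (shape : Int × Int) (doneL : List (Int × Int)) :
    ∀ (L : List (Int × Int)) (q : List (Int × Int) × PySem.Set (Int × Int)),
      (∀ x, x ∈ q.2 ↔ x ∈ doneL ∨ x ∈ q.1) →
      (L.foldl (pvCellB shape) q).1 = pvScan shape doneL L q.1
      ∧ ∀ x, x ∈ (L.foldl (pvCellB shape) q).2
          ↔ x ∈ doneL ∨ x ∈ (L.foldl (pvCellB shape) q).1 := by
  intro L
  induction L with
  | nil => intro q h; exact ⟨rfl, h⟩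
  | cons c L ih =>
    intro q h
    simp only [List.foldl_cons]
    obtain ⟨h1, h2⟩ := pvBcell shape doneL c q h
    obtain ⟨ih1, ih2⟩ := ih (pvCellB shape q c) h2
    refine ⟨?_, ih2⟩
    unfold pvScan
    rw [List.foldl_cons, ← h1]
    exact ih1

-- named step functions (definitionally the ports' loop bodies)
def pvStepA (shape : Int × Int) : (List (Int × Int) × List (Int × Int)) → Int → (List (Int × Int) × List (Int × Int)) :=
  fun s _ =>
    let td :=
      s.2.foldl
        (fun td ij =>
          (nbd_4 ij shape).foldl
            (fun td n => if n ∉ td ∧ n ∉ s.2 ∧ n ∉ s.1 then td ++ [n] else td) td) []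
    (s.1 ++ td, td)

def pvStepB (shape : Int × Int) : (List (Int × Int) × PySem.Set (Int × Int)) → Int → (List (Int × Int) × PySem.Set (Int × Int)) :=
  fun s _ =>
    let p := s.1.foldl (pvCellB shape) ([], s.2)
    (s.1 ++ p.1, p.2)

lemma pvPortA_eq (base : List (Int × Int)) (nth : Int) (shape : Int × Int) :
    dilate_nth base nth shape = ((PySem.List.pyRange 0 nth 1).foldl (pvStepA shape) (base, base)).1 := rfl

lemma pvPortB_eq (base : List (Int × Int)) (nth : Int) (shape : Int × Int) :
    dilate_nth_alt base nth shape
      = ((PySem.List.pyRange 0 nth 1).foldl (pvStepB shape) (base, PySem.Set.ofList base)).1 := rfl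

-- main loop invariant: done = pre ++ to_do, every neighbour of a pre-cell is already
-- in done, and B's seen mirrors membership of done
lemma pv_loop (shape : Int × Int) :
    ∀ (r : List Int) (pre to_do : List (Int × Int)) (seen : PySem.Set (Int × Int)),
      (∀ c ∈ pre, ∀ n ∈ nbd_4 c shape, n ∈ pre ++ to_do) →
      (∀ x, x ∈ seen ↔ x ∈ pre ++ to_do) →
      (r.foldl (pvStepA shape) (pre ++ to_do, to_do)).1
        = (r.foldl (pvStepB shape) (pre ++ to_do, seen)).1 := by
  intro r
  induction r with
  | nil => intro pre to_do seen _ _; rfl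
  | cons x r ih =>
    intro pre to_do seen hclosed hseen
    simp only [List.foldl_cons]
    have hsub : ∀ y ∈ to_do, y ∈ pre ++ to_do := fun y hy => List.mem_append_right pre hy
    have hA : (to_do.foldl
        (fun td ij =>
          (nbd_4 ij shape).foldl
            (fun td n => if n ∉ td ∧ n ∉ to_do ∧ n ∉ pre ++ to_do then td ++ [n] else td) td) [])
        = pvScan shape (pre ++ to_do) to_do [] :=
      pvAstep_eq shape (pre ++ to_do) to_do [] hsub
    obtain ⟨hB1, hB2⟩ := pvBscan shape (pre ++ to_do) (pre ++ to_do) ([], seen)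
      (by intro y; simpa using hseen y)
    have hBskip : pvScan shape (pre ++ to_do) (pre ++ to_do) ([] : List (Int × Int))
        = pvScan shape (pre ++ to_do) to_do [] := by
      unfold pvScan
      rw [List.foldl_append]
      congr 1
      exact pvScan_skip shape (pre ++ to_do) pre [] (fun c hc n hn => hclosed c hc n hn)
    set new := pvScan shape (pre ++ to_do) to_do [] with hnew
    set p := ((pre ++ to_do).foldl (pvCellB shape) ([], seen)) with hp
    have hp1 : p.1 = new := by rw [hp, hB1]; exact hBskip
    have eA : pvStepA shape (pre ++ to_do, to_do) x = ((pre ++ to_do) ++ new, new) :=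
      congrArg (fun l => ((pre ++ to_do) ++ l, l)) hA
    have eB : pvStepB shape (pre ++ to_do, seen) x = ((pre ++ to_do) ++ new, p.2) := by
      have : pvStepB shape (pre ++ to_do, seen) x = ((pre ++ to_do) ++ p.1, p.2) := rfl
      rw [this, hp1]
    have hclosed' : ∀ c ∈ (pre ++ to_do), ∀ n ∈ nbd_4 c shape, n ∈ (pre ++ to_do) ++ new := by
      intro c hc n hn
      rcases List.mem_append.mp hc with hc | hc
      · exact List.mem_append_left _ (hclosed c hc n hn)
      · rcases pvScan_covers shape (pre ++ to_do) to_do [] c hc n hn with h | h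
        · exact List.mem_append_left _ h
        · exact List.mem_append_right _ h
    have hseen' : ∀ y, y ∈ p.2 ↔ y ∈ (pre ++ to_do) ++ new := by
      intro y
      rw [List.mem_append]
      rw [← hp1]
      exact hB2 y
    rw [eA, eB]
    exact ih (pre ++ to_do) new p.2 hclosed' hseen'

-- ===== VERDICT (by name: the statement is the Claim_ definition above) =====
theorem dilate_nth_spec : Claim_equal_dilate_nth := by
  intro base nth shape _
  unfold Spec_dilate_nth
  rw [pvPortA_eq, pvPortB_eq]
  exact pv_loop shape (PySem.List.pyRange 0 nth 1) [] base (PySem.Set.ofList base)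
    (by simp) (fun y => by simp [PySem.Set.mem_ofList])
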